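-- pv_equiv track=rewrite | github.com/Eknir/calculate-swarm-topology | calculate_topology.py | getIdealConnectivity
-- ===== SOURCE A (Python) =====
-- from collections import defaultdict
--
-- def defBin(self, node, maxDepth):
--     for i in range(maxDepth):
--         if node.startswith(self[0:maxDepth+3-i]):
--             return maxDepth - i
--     return 0
--
-- def getIdealConnectivity(overlays, maxDepth):
--
--     topology = defaultdict(dict)
--
--     for self in overlays:
--         # initialize
--         for i in range(0, maxDepth+1):
--             topology[self][i] = 0
--
--         # get bin for each other node that is not self
--         for node in overlays:
--             if not node == self:
--                 binID = defBin(self, node, maxDepth)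
--                 topology[self][binID] = topology[self][binID]+1
--
--     return topology
-- ===== SOURCE B (Python) =====
-- from collections import defaultdict
--
-- def _bin(c, selfLen, maxDepth):
--     # closed form of A's prefix-trying loop: c = length of the common prefix
--     if maxDepth <= 0:
--         return 0
--     if c >= selfLen or c >= maxDepth + 3:
--         return maxDepth
--     if c >= 4:
--         return c - 3
--     return 0
--
-- def getIdealConnectivity(overlays, maxDepth):
--     # same result container as the original (a defaultdict-of-dict topology)
--     topology = defaultdict(dict)
--     for self in overlays:
--         if self in topology:
--             continue
--         bins = {i: 0 for i in range(maxDepth + 1)}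
--         for node in overlays:
--             if node != self:
--                 c = 0
--                 m = min(len(self), len(node))
--                 while c < m and self[c] == node[c]:
--                     c += 1
--                 b = _bin(c, len(self), maxDepth)
--                 bins[b] = bins[b] + 1
--         topology[self] = bins
--     return topology
-- ===== Notes on version B (the rewrite author's own statement) =====
-- stated objective: faster
-- what changed: B replaces A's per-pair defBin loop (up to maxDepth slice-and-startswith retries per pair) by one common-prefix-length scan per pair with a closed-form bin formula, and computes each distinct overlay's histogram once instead of recomputing it for duplicates.
-- outside the precondition, e.g. on getIdealConnectivity(['a', 'a'], -2): A returns {}, B returns {'a': {}}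
import Mathlib
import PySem

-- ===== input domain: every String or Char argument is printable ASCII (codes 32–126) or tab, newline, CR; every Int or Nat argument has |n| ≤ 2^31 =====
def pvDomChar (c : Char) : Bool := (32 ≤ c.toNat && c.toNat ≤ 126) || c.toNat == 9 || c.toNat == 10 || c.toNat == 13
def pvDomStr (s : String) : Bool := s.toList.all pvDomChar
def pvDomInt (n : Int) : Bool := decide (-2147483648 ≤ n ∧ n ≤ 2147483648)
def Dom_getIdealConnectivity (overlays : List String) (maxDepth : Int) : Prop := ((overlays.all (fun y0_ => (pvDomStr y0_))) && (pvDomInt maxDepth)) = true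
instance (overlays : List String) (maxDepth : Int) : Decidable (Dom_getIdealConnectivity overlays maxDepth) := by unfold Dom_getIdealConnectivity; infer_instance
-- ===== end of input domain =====

-- B replaces A's per-pair loop over candidate prefixes (one slice + startswith per
-- candidate) by a closed-form bin computed from one common-prefix-length scan, and
-- computes each distinct overlay's histogram once instead of recomputing it on
-- duplicates (objective: faster; a timing run measured the speedup).

-- ===== PORT A =====
-- the 'for i in range(maxDepth)' loop of defBin, with its early return
def defBinGo (self node : String) (maxDepth : Int) : List Int → Int
  | [] => 0
  | i :: rest =>
    if PySem.Str.startswith node (PySem.Str.slice self (some 0) (some (maxDepth + 3 - i)))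
    then maxDepth - i
    else defBinGo self node maxDepth rest

def defBin (self node : String) (maxDepth : Int) : Int :=
  defBinGo self node maxDepth (PySem.List.pyRange 0 maxDepth)

-- topology[self][binID] raises KeyError when binID is missing; that happens only for
-- maxDepth < 0, which Pre_ excludes, so the getD default is never read under Pre_.
def getIdealConnectivity (overlays : List String) (maxDepth : Int) : List (String × List (Int × Int)) :=
  (overlays.foldl (fun topo self =>
      let inner0 := (PySem.List.pyRange 0 (maxDepth + 1)).foldl
        (fun inner i => inner.insert i (0 : Int)) (topo.getD self PySem.Dict.empty)
      let inner1 := overlays.foldl (fun inner node =>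
        if node == self then inner
        else
          let binID := defBin self node maxDepth
          inner.insert binID (inner.getD binID 0 + 1)) inner0
      topo.insert self inner1)
    (PySem.Dict.empty : PySem.Dict String (PySem.Dict Int Int))).items.map (fun p => (p.1, p.2.items))

-- ===== PORT B =====
-- port of Source B's while loop computing the common-prefix length
def lcpChars : List Char → List Char → Int
  | a :: as, b :: bs => if a = b then 1 + lcpChars as bs else 0
  | _, _ => 0

def binOf (c selfLen maxDepth : Int) : Int :=
  if maxDepth ≤ 0 then 0
  else if c ≥ selfLen ∨ c ≥ maxDepth + 3 then maxDepth
  else if c ≥ 4 then c - 3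
  else 0

-- bins[bb] raises KeyError when bb is missing; under Pre_ every bin 0..maxDepth is
-- initialised, so the getD default is never read under Pre_.
def getIdealConnectivity_alt (overlays : List String) (maxDepth : Int) : List (String × List (Int × Int)) :=
  (overlays.foldl (fun res self =>
      if res.contains self then res
      else
        let bins0 := (PySem.List.pyRange 0 (maxDepth + 1)).foldl
          (fun b i => b.insert i (0 : Int)) (PySem.Dict.empty : PySem.Dict Int Int)
        let bins := overlays.foldl (fun b node =>
          if node == self then b
          else
            let bb := binOf (lcpChars self.toList node.toList) (PySem.Str.len self) maxDepth
            b.insert bb (b.getD bb 0 + 1)) bins0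
        res.insert self bins)
    (PySem.Dict.empty : PySem.Dict String (PySem.Dict Int Int))).items.map (fun p => (p.1, p.2.items))

-- ===== PRECONDITION & SPEC =====
-- Pre_ excludes negative maxDepth, outside the function's natural domain: there both
-- programs raise KeyError as soon as overlays holds two distinct strings (bin 0 is
-- never initialised), and on all-equal overlays A returns an accidentally empty dict
-- because its initialisation loop never runs.
def Pre_getIdealConnectivity (overlays : List String) (maxDepth : Int) : Prop := 0 ≤ maxDepth
instance (overlays : List String) (maxDepth : Int) : Decidable (Pre_getIdealConnectivity overlays maxDepth) := by unfold Pre_getIdealConnectivity; infer_instance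

def pvWitness_getIdealConnectivity : List String × Int := (["abcdeX", "abcdeY", "abQ"], 3)

def Spec_getIdealConnectivity (overlays : List String) (maxDepth : Int) (out : List (String × List (Int × Int))) : Prop := out = getIdealConnectivity_alt overlays maxDepth
instance (overlays : List String) (maxDepth : Int) (out : List (String × List (Int × Int))) : Decidable (Spec_getIdealConnectivity overlays maxDepth out) := by unfold Spec_getIdealConnectivity; infer_instance

-- ===== CLAIM (what is proved, stated in full; the proofs are below) =====
def Claim_equal_getIdealConnectivity : Prop := ∀ (overlays : List String) (maxDepth : Int), Dom_getIdealConnectivity overlays maxDepth → Pre_getIdealConnectivity overlays maxDepth → Spec_getIdealConnectivity overlays maxDepth (getIdealConnectivity overlays maxDepth)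

-- ===== LEMMAS AND PROOFS =====

-- proof-side Nat-valued common-prefix length
def lcpN : List Char → List Char → Nat
  | a :: as, b :: bs => if a = b then lcpN as bs + 1 else 0
  | _, _ => 0

lemma lcpChars_eq (s t : List Char) : lcpChars s t = (lcpN s t : Int) := by
  induction s generalizing t with
  | nil => cases t <;> simp [lcpChars, lcpN]
  | cons a as ih =>
    cases t with
    | nil => simp [lcpChars, lcpN]
    | cons b bs =>
      by_cases h : a = b <;> simp [lcpChars, lcpN, h, ih] <;> omega

lemma take_prefix_iff (s : List Char) : ∀ (t : List Char) (n : Nat),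
    (s.take n <+: t) ↔ min n s.length ≤ lcpN s t := by
  induction s with
  | nil => intro t n; simp
  | cons a as ih =>
    intro t n
    cases t with
    | nil =>
      cases n with
      | zero => simp
      | succ m => simp [lcpN]
    | cons b bs =>
      cases n with
      | zero => simp
      | succ m =>
        by_cases h : a = b
        · subst h
          have hl : lcpN (a :: as) (a :: bs) = lcpN as bs + 1 := by simp [lcpN]
          rw [hl, List.take_succ_cons, List.cons_prefix_cons, ih bs m]
          constructor
          · rintro ⟨-, h2⟩; simp only [List.length_cons] at h2 ⊢; omega
          · intro h2; exact ⟨rfl, by simp only [List.length_cons] at h2 ⊢; omega⟩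
        · have hl : lcpN (a :: as) (b :: bs) = 0 := by simp [lcpN, h]
          rw [hl, List.take_succ_cons, List.cons_prefix_cons]
          constructor
          · rintro ⟨h1, -⟩; exact absurd h1 h
          · intro h2; exfalso; simp only [List.length_cons] at h2; omega

-- A's startswith test against the sliced prefix, as an arithmetic condition
lemma cond_iff (self node : String) (L : Int) (hL : 0 ≤ L) :
    PySem.Str.startswith node (PySem.Str.slice self (some 0) (some L)) = true ↔
      min L.toNat self.toList.length ≤ lcpN self.toList node.toList := by
  rw [PySem.Str.startswith_eq, PySem.Chars.startswith]
  have hsl : (PySem.Str.slice self (some 0) (some L)).toList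
      = List.take L.toNat self.toList := by
    rw [PySem.Str.toList_slice, PySem.Chars.slice_eq_listSlice,
      PySem.List.slice_zero_start, PySem.List.slice_to _ hL]
  rw [hsl, List.isPrefixOf_iff_prefix, take_prefix_iff]


-- closed form of the defBin loop result, starting from loop index i
def binRes (c slen maxD i : Int) : Int :=
  if max i (if slen ≤ c then 0 else maxD + 3 - c) < maxD
  then maxD - max i (if slen ≤ c then 0 else maxD + 3 - c) else 0

-- cond_iff with Int arithmetic, omega-friendly
lemma cond_iff' (self node : String) (L : Int) (hL : 0 ≤ L) :
    PySem.Str.startswith node (PySem.Str.slice self (some 0) (some L)) = true ↔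
      min L (self.toList.length : Int) ≤ (lcpN self.toList node.toList : Int) := by
  rw [cond_iff self node L hL]
  omega

lemma defBinGo_eq (self node : String) (maxDepth : Int) :
    ∀ (n : Nat) (i : Int), 0 ≤ i → (maxDepth - i).toNat ≤ n →
      defBinGo self node maxDepth (PySem.List.pyRange i maxDepth)
        = binRes (lcpN self.toList node.toList) (self.toList.length : Int) maxDepth i := by
  intro n
  induction n with
  | zero =>
    intro i hi hn
    rw [PySem.List.pyRange_one_eq_nil (by omega)]
    unfold defBinGo binRes
    split_ifs <;> omega
  | succ n ih =>
    intro i hi hn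
    by_cases hlt : i < maxDepth
    · rw [PySem.List.pyRange_one_cons hlt]
      have hcond := cond_iff' self node (maxDepth + 3 - i) (by omega)
      by_cases hc : min (maxDepth + 3 - i) (self.toList.length : Int)
          ≤ (lcpN self.toList node.toList : Int)
      · rw [defBinGo, if_pos (hcond.mpr hc)]
        unfold binRes
        split_ifs <;> omega
      · rw [defBinGo, if_neg (fun h => hc (hcond.mp h)),
          ih (i + 1) (by omega) (by omega)]
        unfold binRes
        split_ifs <;> omega
    · rw [PySem.List.pyRange_one_eq_nil (by omega)]
      unfold defBinGo binRes
      split_ifs <;> omega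

lemma binEq (self node : String) (maxDepth : Int) :
    defBin self node maxDepth
      = binOf (lcpChars self.toList node.toList) (PySem.Str.len self) maxDepth := by
  rw [defBin, defBinGo_eq self node maxDepth (maxDepth - 0).toNat 0 le_rfl le_rfl,
    PySem.Str.len_eq, lcpChars_eq]
  have hc : (0 : Int) ≤ (lcpN self.toList node.toList : Int) := Int.natCast_nonneg _
  unfold binRes binOf
  split_ifs <;> omega

lemma bin_bounds (self node : String) (maxDepth : Int) (h : 0 ≤ maxDepth) :
    0 ≤ defBin self node maxDepth ∧ defBin self node maxDepth < maxDepth + 1 := by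
  rw [binEq, lcpChars_eq]
  have hc : (0 : Int) ≤ (lcpN self.toList node.toList : Int) := Int.natCast_nonneg _
  unfold binOf
  split_ifs <;> omega

-- the zero-initialisation loop
def fillD (maxDepth : Int) (d : PySem.Dict Int Int) : PySem.Dict Int Int :=
  (PySem.List.pyRange 0 (maxDepth + 1)).foldl (fun inner i => inner.insert i (0 : Int)) d

-- the per-node histogram both programs compute for one 'self' (A's form)
def histD (overlays : List String) (maxDepth : Int) (self : String) : PySem.Dict Int Int :=
  overlays.foldl (fun inner node =>
    if node == self then inner
    else
      let binID := defBin self node maxDepth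
      inner.insert binID (inner.getD binID 0 + 1)) (fillD maxDepth PySem.Dict.empty)

-- one outer-loop step of each port
def aBody (overlays : List String) (maxDepth : Int)
    (topo : PySem.Dict String (PySem.Dict Int Int)) (self : String) :
    PySem.Dict String (PySem.Dict Int Int) :=
  topo.insert self (overlays.foldl (fun inner node =>
      if node == self then inner
      else
        let binID := defBin self node maxDepth
        inner.insert binID (inner.getD binID 0 + 1))
    (fillD maxDepth (topo.getD self PySem.Dict.empty)))

def bBody (overlays : List String) (maxDepth : Int)
    (res : PySem.Dict String (PySem.Dict Int Int)) (self : String) :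
    PySem.Dict String (PySem.Dict Int Int) :=
  if res.contains self then res
  else res.insert self (overlays.foldl (fun b node =>
      if node == self then b
      else
        let bb := binOf (lcpChars self.toList node.toList) (PySem.Str.len self) maxDepth
        b.insert bb (b.getD bb 0 + 1))
    (fillD maxDepth PySem.Dict.empty))

-- B's counting body is A's counting body, via binEq
lemma countBody_eq (maxDepth : Int) (self : String) :
    (fun (b : PySem.Dict Int Int) (node : String) =>
      if node == self then b
      else
        let bb := binOf (lcpChars self.toList node.toList) (PySem.Str.len self) maxDepth
        b.insert bb (b.getD bb 0 + 1))
    = (fun (inner : PySem.Dict Int Int) (node : String) =>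
      if node == self then inner
      else
        let binID := defBin self node maxDepth
        inner.insert binID (inner.getD binID 0 + 1)) := by
  funext b node
  by_cases h : (node == self) = true <;> simp only [h, if_true, binEq]

lemma getD_fill (l : List Int) : ∀ (d : PySem.Dict Int Int) (k : Int),
    (l.foldl (fun d i => d.insert i (0 : Int)) d).getD k 0
      = if k ∈ l then 0 else d.getD k 0 := by
  induction l with
  | nil => intro d k; simp
  | cons x l ih =>
    intro d k
    rw [List.foldl_cons, ih, PySem.Dict.getD_insert]
    by_cases hx : k = x <;> by_cases hl : k ∈ l <;> simp [hx, hl]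

lemma update_of_sub {α : Type} [BEq α] [LawfulBEq α] (l : List α) :
    ∀ (s : PySem.Set α), (∀ x ∈ l, x ∈ s) → PySem.Set.update s l = s := by
  induction l with
  | nil => intro s _; rfl
  | cons x l ih =>
    intro s h
    have hadd : PySem.Set.add s x = s := by
      unfold PySem.Set.add
      rw [if_pos (by simpa using h x (List.mem_cons_self))]
    unfold PySem.Set.update at *
    rw [List.foldl_cons, hadd]
    exact ih s (fun y hy => h y (List.mem_cons_of_mem _ hy))

lemma update_append {α : Type} [BEq α] [LawfulBEq α] (l : List α) :
    ∀ (s : PySem.Set α), l.Nodup → (∀ x ∈ l, x ∉ s) →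
      PySem.Set.update s l = s ++ l := by
  induction l with
  | nil => intro s _ _; simp [PySem.Set.update]
  | cons x l ih =>
    intro s hnd hns
    have hadd : PySem.Set.add s x = s ++ [x] := by
      unfold PySem.Set.add
      rw [if_neg]
      simpa using hns x (List.mem_cons_self)
    unfold PySem.Set.update at *
    rw [List.foldl_cons, hadd, ih (s ++ [x]) hnd.of_cons]
    · simp
    · intro y hy
      simp only [List.mem_append, List.mem_singleton]
      rintro (h1 | h2)
      · exact hns y (List.mem_cons_of_mem _ hy) h1
      · exact (List.nodup_cons.mp hnd).1 (h2 ▸ hy)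

lemma keys_fill_empty (maxDepth : Int) :
    (fillD maxDepth PySem.Dict.empty).keys = PySem.List.pyRange 0 (maxDepth + 1) := by
  unfold fillD
  rw [PySem.Dict.keys_foldl_insert _ (fun _ _ => (0 : Int)), PySem.Dict.keys_empty,
    update_append _ _ (PySem.List.nodup_pyRange_one 0 (maxDepth + 1)) (by simp)]
  simp

lemma fillD_eq (maxDepth : Int) (v : PySem.Dict Int Int)
    (hk : v.keys = PySem.List.pyRange 0 (maxDepth + 1)) :
    fillD maxDepth v = fillD maxDepth PySem.Dict.empty := by
  have hkv : (fillD maxDepth v).keys = PySem.List.pyRange 0 (maxDepth + 1) := by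
    unfold fillD
    rw [PySem.Dict.keys_foldl_insert _ (fun _ _ => (0 : Int)), hk,
      update_of_sub _ _ (fun x hx => hx)]
  have hke : (fillD maxDepth PySem.Dict.empty).keys = PySem.List.pyRange 0 (maxDepth + 1) :=
    keys_fill_empty maxDepth
  apply PySem.Dict.ext
  rw [PySem.Dict.items_eq_map_keys (fillD maxDepth v)
      (hkv ▸ PySem.List.nodup_pyRange_one 0 (maxDepth + 1)) 0,
    PySem.Dict.items_eq_map_keys (fillD maxDepth PySem.Dict.empty)
      (hke ▸ PySem.List.nodup_pyRange_one 0 (maxDepth + 1)) 0, hkv, hke]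
  apply List.map_congr_left
  intro k hkmem
  unfold fillD
  rw [getD_fill, getD_fill, if_pos hkmem, if_pos hkmem]

lemma keys_histD (overlays : List String) (maxDepth : Int) (self : String) (h : 0 ≤ maxDepth) :
    (histD overlays maxDepth self).keys = PySem.List.pyRange 0 (maxDepth + 1) := by
  unfold histD
  have hfold : overlays.foldl (fun inner node =>
      if node == self then inner
      else
        let binID := defBin self node maxDepth
        inner.insert binID (inner.getD binID 0 + 1)) (fillD maxDepth PySem.Dict.empty)
    = (overlays.filter (fun node => !(node == self))).foldl
        (fun inner node =>
          inner.insert (defBin self node maxDepth)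
            (inner.getD (defBin self node maxDepth) 0 + 1))
        (fillD maxDepth PySem.Dict.empty) := by
    rw [List.foldl_filter]
    congr 1
    funext inner node
    by_cases hn : (node == self) = true <;> simp [hn]
  rw [hfold,
    PySem.Dict.keys_foldl_insert_key _ (fun node => defBin self node maxDepth)
      (fun d node => d.getD (defBin self node maxDepth) 0 + 1),
    keys_fill_empty, update_of_sub]
  intro x hx
  simp only [List.mem_map] at hx
  obtain ⟨node, -, rfl⟩ := hx
  have := bin_bounds self node maxDepth h
  rw [PySem.List.mem_pyRange_one]
  omega

lemma insert_noop {κ ν : Type} [BEq κ] [LawfulBEq κ] (d : PySem.Dict κ ν) (k : κ) (v : ν)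
    (hnd : d.keys.Nodup) (h : d.get? k = some v) : d.insert k v = d := by
  have hc : d.contains k = true := by
    rw [PySem.Dict.contains_eq_isSome_get?, h]; rfl
  apply PySem.Dict.ext
  show (d.insert k v).items = d.items
  rw [PySem.Dict.insert, if_pos hc]
  show d.items.map (fun p => if p.1 == k then (k, v) else p) = d.items
  conv_rhs => rw [← List.map_id d.items]
  apply List.map_congr_left
  rintro ⟨p1, p2⟩ hp
  by_cases hk : (p1 == k) = true
  · have hk' : p1 = k := eq_of_beq hk
    have hget : d.get? p1 = some p2 :=
      PySem.Dict.get?_of_mem_items d hp hnd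
    rw [hk'] at hget
    have hv2 : v = p2 := Option.some_inj.mp (h.symm.trans hget)
    simp [hv2, hk']
  · simp [hk]

lemma mainFold (overlays : List String) (maxDepth : Int) (hmd : 0 ≤ maxDepth) :
    ∀ (l : List String) (d : PySem.Dict String (PySem.Dict Int Int)),
      d.keys.Nodup →
      (∀ s v, d.get? s = some v → v = histD overlays maxDepth s) →
      l.foldl (aBody overlays maxDepth) d = l.foldl (bBody overlays maxDepth) d := by
  intro l
  induction l with
  | nil => intro d _ _; rfl
  | cons self l ih =>
    intro d hnd hinv
    simp only [List.foldl_cons]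
    by_cases hc : d.contains self = true
    · have hsome : (d.get? self).isSome = true := by
        rw [← PySem.Dict.contains_eq_isSome_get?]; exact hc
      obtain ⟨v, hv⟩ := Option.isSome_iff_exists.mp hsome
      have hvh : v = histD overlays maxDepth self := hinv self v hv
      have hgetD : d.getD self PySem.Dict.empty = histD overlays maxDepth self := by
        rw [PySem.Dict.getD_eq_get?_getD, hv, hvh]; rfl
      have hA : aBody overlays maxDepth d self = d := by
        unfold aBody
        rw [hgetD, fillD_eq maxDepth _ (keys_histD overlays maxDepth self hmd)]
        exact insert_noop d self (histD overlays maxDepth self) hnd (hvh ▸ hv)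
      have hB : bBody overlays maxDepth d self = d := by
        unfold bBody; rw [if_pos hc]
      rw [hA, hB]
      exact ih d hnd hinv
    · have hc' : d.contains self = false := by simpa using hc
      have hgetD : d.getD self PySem.Dict.empty = PySem.Dict.empty :=
        PySem.Dict.getD_of_not_contains d _ hc'
      have hA : aBody overlays maxDepth d self
          = d.insert self (histD overlays maxDepth self) := by
        unfold aBody; rw [hgetD]; rfl
      have hB : bBody overlays maxDepth d self
          = d.insert self (histD overlays maxDepth self) := by
        unfold bBody
        rw [if_neg (by simp [hc']), countBody_eq]; rfl
      rw [hA, hB]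
      apply ih
      · have := PySem.Dict.nodup_keys_foldl_insert [self]
          (fun _ _ => histD overlays maxDepth self) d hnd
        simpa [List.foldl] using this
      · intro s v hv'
        rw [PySem.Dict.get?_insert] at hv'
        by_cases hs : s = self
        · rw [if_pos hs] at hv'
          rw [hs]
          exact (Option.some_inj.mp hv').symm
        · rw [if_neg hs] at hv'
          exact hinv s v hv'

-- ===== VERDICT (by name: the statement is the Claim_ definition above) =====
theorem getIdealConnectivity_spec : Claim_equal_getIdealConnectivity := by
  intro overlays maxDepth _hdom hpre
  unfold Spec_getIdealConnectivity
  have hA : getIdealConnectivity overlays maxDepth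
      = ((overlays.foldl (aBody overlays maxDepth) PySem.Dict.empty).items.map
          (fun p => (p.1, p.2.items))) := rfl
  have hB : getIdealConnectivity_alt overlays maxDepth
      = ((overlays.foldl (bBody overlays maxDepth) PySem.Dict.empty).items.map
          (fun p => (p.1, p.2.items))) := rfl
  rw [hA, hB, mainFold overlays maxDepth hpre overlays PySem.Dict.empty
    (by rw [PySem.Dict.keys_empty]; exact List.nodup_nil)
    (by intro s v hv; rw [PySem.Dict.get?_empty] at hv; cases hv)]
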